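-- pv_equiv track=rewrite | github.com/VideoVerses/VideoTuna-dev | videotuna/base/inference.py | process_savename
-- ===== SOURCE A (Python) =====
-- from typing import Any, Dict, List, Optional, Union
--
-- def process_savename(savename: List[str], n_per_prompt: int = 1, mode: str = 'default') -> List[str]:
--     """
--     Processes the save name to include the save path.
--
--     :param savename: The name of the file to be saved.
--     :param n_per_prompt: The number of samples per prompt. Default is 1.
--     :param mode: The mode in which the save name is processed. Default is 'default'.
--     :return: The processed save name.
--     """
--     if n_per_prompt == 1:
--         if mode == 'default':
--             newnames = [f"prompt-{idx+1:04d}" for idx in range(len(savename))]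
--         elif mode == 'prompt':
--             newnames = []
--             for idx, name in enumerate(savename):
--                 name = name[:100]  # limit the length of the name
--                 newname = f"{name}"
--                 newnames.append(newname)
--     elif n_per_prompt > 1:
--         if mode == 'default':
--             newnames = []
--             for idx in range(len(savename)):
--                 for i in range(n_per_prompt):
--                     newnames.append(f"prompt-{idx+1:04d}-{i:02d}")
--         elif mode == 'prompt':
--             newnames = []
--             for idx, name in enumerate(savename):
--                 for i in range(n_per_prompt):
--                     name = name[:100]
--                     newnames.append(f"{name}-{i:02d}")
--     else:
--         raise ValueError("Invalid number of samples per prompt.")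
--
--     return newnames
-- ===== SOURCE B (Python) =====
-- def process_savename(savename, n_per_prompt=1, mode='default'):
--     if n_per_prompt <= 0:
--         raise ValueError("Invalid number of samples per prompt.")
--     if mode == 'default':
--         bases = [f"prompt-{idx+1:04d}" for idx in range(len(savename))]
--     elif mode == 'prompt':
--         bases = [name[:100] for name in savename]
--     if n_per_prompt == 1:
--         return bases
--     return [f"{base}-{i:02d}" for base in bases for i in range(n_per_prompt)]
-- ===== Notes on version B (the rewrite author's own statement) =====
-- stated objective: simpler
-- what changed: Replaces the fused 2x2 mode/count branch tree (four loop bodies) with two independent passes: one mode branch builds the base-name list, then a single count-driven expansion appends the -NN suffixes; validation of n_per_prompt moves to the front.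
import Mathlib
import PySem

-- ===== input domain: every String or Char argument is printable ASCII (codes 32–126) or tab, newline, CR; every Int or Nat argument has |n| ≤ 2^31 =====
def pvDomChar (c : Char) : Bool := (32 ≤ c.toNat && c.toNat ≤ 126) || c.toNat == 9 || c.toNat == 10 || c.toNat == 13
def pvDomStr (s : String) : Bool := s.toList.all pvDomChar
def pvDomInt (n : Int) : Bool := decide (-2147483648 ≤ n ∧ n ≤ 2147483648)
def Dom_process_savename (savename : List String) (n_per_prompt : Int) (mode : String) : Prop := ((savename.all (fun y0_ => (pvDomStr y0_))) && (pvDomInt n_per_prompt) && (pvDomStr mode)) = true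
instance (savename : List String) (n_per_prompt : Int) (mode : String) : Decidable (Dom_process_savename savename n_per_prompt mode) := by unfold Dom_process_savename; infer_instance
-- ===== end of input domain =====

-- B replaces A's fused 2x2 mode/count branch tree with two passes (mode → base names, count → suffix
-- expansion); same cost, simpler shape. Equivalence of return values on Pre_ (where A returns at all).

-- f"{n:0<w>d}" for the nonnegative n reached here: zero-pad the decimal digits to width w
def pyPad (w : Nat) (n : Int) : String :=
  String.ofList (List.replicate (w - (PySem.Int.toChars n).length) '0' ++ PySem.Int.toChars n)

-- ===== PORT A =====
def process_savename (savename : List String) (n_per_prompt : Int) (mode : String) : List String :=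
  if n_per_prompt == 1 then
    if mode == "default" then
      (List.range savename.length).map (fun idx => "prompt-" ++ pyPad 4 ((idx : Int) + 1))
    else if mode == "prompt" then
      savename.foldl (fun newnames name =>
        newnames ++ [PySem.Str.slice name none (some 100)]) []
    else []  -- unreachable under Pre_ (Python: UnboundLocalError)
  else if n_per_prompt > 1 then
    if mode == "default" then
      (List.range savename.length).foldl (fun newnames idx =>
        (PySem.List.pyRange 0 n_per_prompt 1).foldl (fun acc i =>
          acc ++ ["prompt-" ++ pyPad 4 ((idx : Int) + 1) ++ "-" ++ pyPad 2 i]) newnames) []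
    else if mode == "prompt" then
      savename.foldl (fun newnames name =>
        ((PySem.List.pyRange 0 n_per_prompt 1).foldl (fun st i =>
          let nm := PySem.Str.slice st.1 none (some 100)
          (nm, st.2 ++ [nm ++ "-" ++ pyPad 2 i])) (name, newnames)).2) []
    else []  -- unreachable under Pre_ (Python: UnboundLocalError)
  else []  -- unreachable under Pre_ (Python: ValueError)

-- ===== PORT B =====
def process_savename_alt (savename : List String) (n_per_prompt : Int) (mode : String) : List String :=
  if n_per_prompt ≤ 0 then []  -- unreachable under Pre_ (Python: ValueError)
  else
    let bases :=
      if mode == "default" then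
        (List.range savename.length).map (fun idx => "prompt-" ++ pyPad 4 ((idx : Int) + 1))
      else if mode == "prompt" then
        savename.map (fun name => PySem.Str.slice name none (some 100))
      else []  -- unreachable under Pre_ (Python: UnboundLocalError)
    if n_per_prompt == 1 then bases
    else bases.flatMap (fun base =>
      (PySem.List.pyRange 0 n_per_prompt 1).map (fun i => base ++ "-" ++ pyPad 2 i))

-- ===== PRECONDITION & SPEC =====
-- Pre_ excludes exactly the inputs where A raises (ValueError for n_per_prompt ≤ 0,
-- UnboundLocalError for a mode other than 'default'/'prompt'); B raises the same exceptions there.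
def Pre_process_savename (savename : List String) (n_per_prompt : Int) (mode : String) : Prop :=
  1 ≤ n_per_prompt ∧ (mode = "default" ∨ mode = "prompt")
instance (savename : List String) (n_per_prompt : Int) (mode : String) : Decidable (Pre_process_savename savename n_per_prompt mode) := by unfold Pre_process_savename; infer_instance
def pvWitness_process_savename : List String × Int × String := (["a cat", "dog"], 2, "prompt")

def Spec_process_savename (savename : List String) (n_per_prompt : Int) (mode : String) (out : List String) : Prop := out = process_savename_alt savename n_per_prompt mode
instance (savename : List String) (n_per_prompt : Int) (mode : String) (out : List String) : Decidable (Spec_process_savename savename n_per_prompt mode out) := by unfold Spec_process_savename; infer_instance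

-- ===== CLAIM (what is proved, stated in full; the proofs are below) =====
def Claim_equal_process_savename : Prop := ∀ (savename : List String) (n_per_prompt : Int) (mode : String), Dom_process_savename savename n_per_prompt mode → Pre_process_savename savename n_per_prompt mode → Spec_process_savename savename n_per_prompt mode (process_savename savename n_per_prompt mode)

-- ===== LEMMAS AND PROOFS =====

lemma foldl_append_singleton {α β : Type} (xs : List α) (f : α → β) (acc : List β) :
    xs.foldl (fun a x => a ++ [f x]) acc = acc ++ xs.map f := by
  induction xs generalizing acc with
  | nil => simp
  | cons x xs ih => simp [ih]

-- truncation to 100 chars is idempotent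
lemma slice100_idem (s : String) :
    PySem.Str.slice (PySem.Str.slice s none (some 100)) none (some 100)
      = PySem.Str.slice s none (some 100) := by
  apply String.toList_injective
  simp only [PySem.Str.toList_slice, PySem.Chars.slice_eq_listSlice]
  rw [show ((100 : Int)) = ((100 : Nat) : Int) from rfl, PySem.List.slice_to_natCast,
    PySem.List.slice_to_natCast]
  simp [List.take_take]

-- A's inner prompt-mode loop (carrying the reassigned name) builds acc ++ the suffix expansion
lemma inner_prompt_loop (ys : List Int) (s : String) (acc : List String) :
    (ys.foldl (fun st i =>
        let nm := PySem.Str.slice st.1 none (some 100)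
        (nm, st.2 ++ [nm ++ "-" ++ pyPad 2 i])) (s, acc)).2
      = acc ++ ys.map (fun i => PySem.Str.slice s none (some 100) ++ "-" ++ pyPad 2 i) := by
  induction ys generalizing s acc with
  | nil => simp
  | cons y ys ih => simp [ih, slice100_idem]

lemma nested_append_loop {α β γ : Type} (xs : List α) (ys : List γ) (g : α → γ → β) (acc : List β) :
    xs.foldl (fun a x => ys.foldl (fun a2 i => a2 ++ [g x i]) a) acc
      = acc ++ xs.flatMap (fun x => ys.map (g x)) := by
  induction xs generalizing acc with
  | nil => simp
  | cons x xs ih =>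
    rw [List.foldl_cons, foldl_append_singleton, ih]
    simp [List.flatMap_cons, List.append_assoc]

lemma outer_prompt_loop (savename : List String) (ys : List Int) (acc : List String) :
    savename.foldl (fun newnames name =>
        ((ys.foldl (fun st i =>
            let nm := PySem.Str.slice st.1 none (some 100)
            (nm, st.2 ++ [nm ++ "-" ++ pyPad 2 i])) (name, newnames)).2)) acc
      = acc ++ savename.flatMap
          (fun name => ys.map (fun i => PySem.Str.slice name none (some 100) ++ "-" ++ pyPad 2 i)) := by
  induction savename generalizing acc with
  | nil => simp
  | cons s ss ih =>
    rw [List.foldl_cons, inner_prompt_loop, ih]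
    simp [List.flatMap_cons, List.append_assoc]

-- ===== VERDICT (by name: the statement is the Claim_ definition above) =====
theorem process_savename_spec : Claim_equal_process_savename := by
  intro savename n mode _ hpre
  obtain ⟨hn, hmode⟩ := hpre
  unfold Spec_process_savename process_savename process_savename_alt
  have hn0 : ¬ n ≤ 0 := by omega
  rcases eq_or_lt_of_le hn with h1 | h1
  · -- n = 1
    rcases hmode with h | h <;> subst h
    · simp [← h1]
    · rw [foldl_append_singleton]; simp [← h1]
  · -- n > 1
    have hne : (n == 1) = false := by simp; omega
    rcases hmode with h | h <;> subst h
    · rw [nested_append_loop]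
      simp [hne, hn0, h1, List.flatMap_map]
    · rw [outer_prompt_loop]
      simp [hne, hn0, h1, List.flatMap_map]
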